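-- pv_equiv track=rewrite | github.com/Wamadahama/haiku | syllables.py | contiguous_vowel_count
-- ===== SOURCE A (Python) =====
-- def is_vowel(character):
--     """Determines whether a character is a vowel or not """
--     vowels = ["A", "E", "I", "O", "U"]
--     if character.upper() in vowels:
--         return True
--     else:
--         return False
--
-- def contiguous_vowel_count(search_string):
--     """ Determines if there is contiguous vowels in a search string and if there is then search it"""
--     last_char = ''
--     counter = 0
--
--     for _,character in enumerate(search_string):
--         if is_vowel(character) and is_vowel(last_char):
--             counter += 1
--
--         last_char = character
--     return counter
-- ===== SOURCE B (Python) =====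
-- def contiguous_vowel_count(search_string):
--     """Count adjacent vowel pairs by scanning maximal vowel runs:
--     a run of L consecutive vowels contributes L - 1 pairs."""
--     total = 0
--     i = 0
--     n = len(search_string)
--     while i < n:
--         if search_string[i] in "AEIOUaeiou":
--             j = i + 1
--             while j < n and search_string[j] in "AEIOUaeiou":
--                 j += 1
--             total += j - i - 1
--             i = j
--         else:
--             i += 1
--     return total
-- ===== Notes on version B (the rewrite author's own statement) =====
-- stated objective: faster
-- what changed: B scans the string for maximal runs of vowels and sums (run length - 1) per run, instead of A's per-character comparison with the previous character via an .upper()-and-list-membership helper called twice per character.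
import Mathlib
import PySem

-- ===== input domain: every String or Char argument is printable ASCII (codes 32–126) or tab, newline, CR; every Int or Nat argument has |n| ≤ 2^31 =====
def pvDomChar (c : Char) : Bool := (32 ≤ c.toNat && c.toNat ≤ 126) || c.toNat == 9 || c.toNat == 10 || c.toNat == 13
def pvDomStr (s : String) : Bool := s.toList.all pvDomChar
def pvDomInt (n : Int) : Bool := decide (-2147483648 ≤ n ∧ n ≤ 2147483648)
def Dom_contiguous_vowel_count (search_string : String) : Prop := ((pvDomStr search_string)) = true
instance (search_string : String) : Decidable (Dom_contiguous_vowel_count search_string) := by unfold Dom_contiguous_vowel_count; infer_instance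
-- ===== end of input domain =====

-- B counts adjacent vowel pairs by scanning maximal vowel runs (each run of length L
-- contributes L-1 pairs) instead of A's per-character compare-with-previous loop.


-- ===== PORT A =====
-- is_vowel(character): character.upper() in ["A","E","I","O","U"]
def is_vowel (character : Char) : Bool :=
  if ['A','E','I','O','U'].contains (PySem.Chars.upperChar character) then true else false

-- A's last_char is '' or a one-character string: Option Char; is_vowel('') is False
-- (''.upper() is not in the vowel list), hence the none branch.
def is_vowel_last : Option Char → Bool
  | none => false
  | some l => is_vowel l

-- one iteration of A's for-loop body: state = (last_char, counter)
def aStep (st : Option Char × Int) (p : Int × Char) : Option Char × Int :=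
  (some p.2, if is_vowel p.2 && is_vowel_last st.1 then st.2 + 1 else st.2)

def contiguous_vowel_count (search_string : String) : Int :=
  ((PySem.List.enumerate search_string.toList).foldl aStep (none, (0 : Int))).2

-- ===== PORT B =====
def altIsVowel (c : Char) : Bool := ['A','E','I','O','U','a','e','i','o','u'].contains c

-- Source B's outer while-loop: on a vowel, consume its whole run and add (run length - 1)
def altGo : List Char → Int
  | [] => 0
  | c :: t =>
    if altIsVowel c then
      ((t.takeWhile altIsVowel).length : Int) + altGo (t.dropWhile altIsVowel)
    else
      altGo t
termination_by l => l.length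
decreasing_by
  · simp only [List.length_cons]
    exact Nat.lt_succ_of_le (List.length_dropWhile_le _ _)
  · simp

def contiguous_vowel_count_alt (search_string : String) : Int :=
  altGo search_string.toList

-- ===== PRECONDITION & SPEC =====
def Spec_contiguous_vowel_count (search_string : String) (out : Int) : Prop := out = contiguous_vowel_count_alt search_string
instance (search_string : String) (out : Int) : Decidable (Spec_contiguous_vowel_count search_string out) := by unfold Spec_contiguous_vowel_count; infer_instance

-- ===== CLAIM (what is proved, stated in full; the proofs are below) =====
def Claim_equal_contiguous_vowel_count : Prop := ∀ (search_string : String), Dom_contiguous_vowel_count search_string → Spec_contiguous_vowel_count search_string (contiguous_vowel_count search_string)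

-- ===== LEMMAS AND PROOFS =====
theorem char_eq_iff {c d : Char} : c = d ↔ c.toNat = d.toNat :=
  eq_iff_eq_of_cmp_eq_cmp rfl

-- A's .upper()-based vowel test agrees with B's two-case character set, for every Char
theorem contains_upper_eq (c : Char) :
    ['A','E','I','O','U'].contains (PySem.Chars.upperChar c)
      = ['A','E','I','O','U','a','e','i','o','u'].contains c := by
  simp only [PySem.Chars.upperChar, PySem.Chars.islower]
  split_ifs with h
  · have hc : 97 ≤ c.toNat ∧ c.toNat ≤ 122 := by
      simp only [Bool.and_eq_true, decide_eq_true_eq] at h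
      exact ⟨h.1, h.2⟩
    have hv : (Char.ofNat (c.toNat - 32)).toNat = c.toNat - 32 := by
      rw [Char.toNat_ofNat, if_pos]; left; omega
    simp only [List.contains_eq_mem, List.mem_cons, List.not_mem_nil, or_false,
      decide_eq_decide, char_eq_iff, hv,
      show ('A').toNat = 65 from rfl, show ('E').toNat = 69 from rfl,
      show ('I').toNat = 73 from rfl, show ('O').toNat = 79 from rfl,
      show ('U').toNat = 85 from rfl, show ('a').toNat = 97 from rfl,
      show ('e').toNat = 101 from rfl, show ('i').toNat = 105 from rfl,
      show ('o').toNat = 111 from rfl, show ('u').toNat = 117 from rfl]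
    omega
  · have hc : ¬(97 ≤ c.toNat ∧ c.toNat ≤ 122) := fun hh =>
      h (by simp only [Bool.and_eq_true, decide_eq_true_eq]; exact ⟨hh.1, hh.2⟩)
    simp only [List.contains_eq_mem, List.mem_cons, List.not_mem_nil, or_false,
      decide_eq_decide, char_eq_iff,
      show ('A').toNat = 65 from rfl, show ('E').toNat = 69 from rfl,
      show ('I').toNat = 73 from rfl, show ('O').toNat = 79 from rfl,
      show ('U').toNat = 85 from rfl, show ('a').toNat = 97 from rfl,
      show ('e').toNat = 101 from rfl, show ('i').toNat = 105 from rfl,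
      show ('o').toNat = 111 from rfl, show ('u').toNat = 117 from rfl]
    omega

theorem vowel_bridge (c : Char) : is_vowel c = altIsVowel c := by
  rw [is_vowel, altIsVowel, ← contains_upper_eq c]
  cases hb : ['A','E','I','O','U'].contains (PySem.Chars.upperChar c) <;> simp [hb]

-- whether the first character (if any) is a vowel
def headV : List Char → Bool
  | [] => false
  | c :: _ => altIsVowel c

-- prepending a vowel to t adds 1 pair iff t starts with a vowel
theorem altGo_vowel_step (t : List Char) :
    altGo t + (if headV t then (1 : Int) else 0)
      = ((t.takeWhile altIsVowel).length : Int) + altGo (t.dropWhile altIsVowel) := by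
  cases t with
  | nil => simp [altGo, headV]
  | cons c u =>
    by_cases h : altIsVowel c = true
    · have e : altGo (c :: u) = ((u.takeWhile altIsVowel).length : Int)
          + altGo (u.dropWhile altIsVowel) := by
        rw [altGo, if_pos (by simp [h])]
      simp only [headV, h, if_pos, List.takeWhile_cons, List.dropWhile_cons, e]
      simp [h]
      omega
    · have hc : altIsVowel c = false := by simpa using h
      have e : altGo (c :: u) = altGo u := by
        rw [altGo, if_neg (by simp [hc])]
      simp [headV, hc, e]

-- loop invariant: A's fold from state st equals st.2 + B's run count, plus one extra
-- pair when the carried last_char is a vowel and the remaining input starts with one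
theorem fold_invariant (t : List Char) (st : Option Char × Int) (k : Int) :
    ((PySem.List.enumerate t k).foldl aStep st).2
      = st.2 + altGo t + (if is_vowel_last st.1 && headV t then (1 : Int) else 0) := by
  induction t generalizing st k with
  | nil => simp [PySem.List.enumerate_nil, altGo, headV]
  | cons c u ih =>
    obtain ⟨olc, acc⟩ := st
    rw [PySem.List.enumerate_cons, List.foldl_cons, ih]
    by_cases h : altIsVowel c = true
    · have ealt : altGo (c :: u) = ((u.takeWhile altIsVowel).length : Int)
          + altGo (u.dropWhile altIsVowel) := by
        rw [altGo, if_pos (by simp [h])]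
      rw [ealt, ← altGo_vowel_step u]
      cases olc <;>
        by_cases hu : headV u = true <;>
          simp [aStep, is_vowel_last, vowel_bridge, headV, h, hu] <;>
            split_ifs <;> omega
    · have hc : altIsVowel c = false := by simpa using h
      have ealt : altGo (c :: u) = altGo u := by
        rw [altGo, if_neg (by simp [hc])]
      cases olc <;>
        simp [aStep, is_vowel_last, vowel_bridge, headV, hc, ealt]

-- ===== VERDICT (by name: the statement is the Claim_ definition above) =====
theorem contiguous_vowel_count_spec : Claim_equal_contiguous_vowel_count := by
  intro s _
  show contiguous_vowel_count s = contiguous_vowel_count_alt s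
  rw [contiguous_vowel_count, contiguous_vowel_count_alt, fold_invariant]
  simp [is_vowel_last]
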